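-- pv_equiv track=rewrite | github.com/romadvestitri/crypto_labs | encryption_methods.py | gen_key_arr
-- ===== SOURCE A (Python) =====
-- from pprint import pprint
--
-- def find_index(sorted_key_arr, visited_arr, symbol):
--     for i in range(len(sorted_key_arr)):
--         if (sorted_key_arr[i] == symbol) and (not visited_arr[i]):
--             visited_arr[i] = True
--             return i, visited_arr
--
--     return None, visited_arr
--
-- def gen_key_arr(key):
--     key_arr = [list(key), [''] * len(key)]
--     visited_arr = [False] * len(key)
--
--     let_key_sorted_arr = list(key)
--     let_key_sorted_arr.sort()
--
--     let_ind = 0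
--     for let in key_arr[0]:
--         #sort_ind = let_key_sorted_arr.index(let)
--         sort_ind, visited_arr = find_index(let_key_sorted_arr, visited_arr, let)
--         # filling list with position of symbol
--         key_arr[1][let_ind] = str(sort_ind + 1)
--         let_ind += 1
--
--     pprint(key_arr)
--     return key_arr
-- ===== SOURCE B (Python) =====
-- def gen_key_arr(key):
--     # Closed-form rank: a char's 1-based position in the sorted key equals
--     # (number of strictly smaller chars) + (number of equal chars before it) + 1.
--     # No sort, no visited array, no mutation.  (Return value only: does not pprint.)
--     chars = list(key)
--     ranks = [str(1 + sum(d < c for d in chars) + sum(d == c for d in chars[:i]))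
--              for i, c in enumerate(chars)]
--     return [chars, ranks]
-- ===== Notes on version B (the rewrite author's own statement) =====
-- stated objective: simpler
-- what changed: Replaces the sort plus mutable visited-array linear-scan lookup by a closed-form counting rank: 1 + #strictly-smaller chars + #earlier equal chars; no sorting, no mutation, no helper.
import Mathlib
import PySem

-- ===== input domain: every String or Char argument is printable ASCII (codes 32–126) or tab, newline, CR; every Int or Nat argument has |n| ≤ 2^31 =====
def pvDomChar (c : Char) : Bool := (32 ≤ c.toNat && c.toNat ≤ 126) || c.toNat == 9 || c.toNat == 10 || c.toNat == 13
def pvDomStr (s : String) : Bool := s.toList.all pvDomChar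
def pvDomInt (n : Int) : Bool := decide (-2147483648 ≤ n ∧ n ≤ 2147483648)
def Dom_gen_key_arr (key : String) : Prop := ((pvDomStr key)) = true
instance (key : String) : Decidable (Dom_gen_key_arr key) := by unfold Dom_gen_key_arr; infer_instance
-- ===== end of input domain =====

-- B replaces A's sort + mutable visited-array scan by a closed-form counting rank (simpler);
-- equivalence is about the RETURN value only: A additionally pprints its result, B does not.

-- ===== PORT A =====

-- the scan of find_index: 'for i in range(len(sorted_key_arr)): …' starting at index i
def findIndexGo (s : List String) (v : List Bool) (symbol : String) (i : Nat) :
    Option Nat × List Bool :=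
  if h : i < s.length then
    if s[i] = symbol ∧ v.getD i false = false then (some i, v.set i true)
    else findIndexGo s v symbol (i + 1)
  else (none, v)
termination_by s.length - i

def find_index (sorted_key_arr : List String) (visited_arr : List Bool) (symbol : String) :
    Option Nat × List Bool :=
  findIndexGo sorted_key_arr visited_arr symbol 0

def gen_key_arr (key : String) : List (List String) :=
  -- list(key): the list of single-character strings (hand port; exact for any str)
  let chars := key.toList.map (fun c => String.mk [c])
  let keyArr1 : List String := List.replicate chars.length ""   -- [''] * len(key)
  let visited : List Bool := List.replicate chars.length false
  let sortedArr := PySem.List.sorted chars (fun x => x) false   -- .sort()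
  let fin := chars.foldl
    (fun (st : List String × List Bool × Nat) c =>
      let r := find_index sortedArr st.2.1 c
      let rankStr := match r.1 with
        | some i => PySem.Int.toStr ((i : Int) + 1)   -- str(sort_ind + 1)
        | none => ""   -- unreachable: every char of key occurs in the sorted copy
      (st.1.set st.2.2 rankStr, r.2, st.2.2 + 1))
    (keyArr1, visited, 0)
  [chars, fin.1]

-- ===== PORT B =====

def gen_key_arr_alt (key : String) : List (List String) :=
  let chars := key.toList.map (fun c => String.mk [c])
  let ranks := (PySem.List.enumerate chars).map (fun p =>
    PySem.Int.toStr (1 + (chars.map (fun d => if d < p.2 then (1 : Int) else 0)).sum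
      + ((PySem.List.slice chars none (some p.1)).map (fun d => if d = p.2 then (1 : Int) else 0)).sum))
  [chars, ranks]

-- ===== PRECONDITION & SPEC =====
def Spec_gen_key_arr (key : String) (out : List (List String)) : Prop := out = gen_key_arr_alt key
instance (key : String) (out : List (List String)) : Decidable (Spec_gen_key_arr key out) := by unfold Spec_gen_key_arr; infer_instance

-- ===== CLAIM (what is proved, stated in full; the proofs are below) =====
def Claim_equal_gen_key_arr : Prop := ∀ (key : String), Dom_gen_key_arr key → Spec_gen_key_arr key (gen_key_arr key)

-- ===== LEMMAS AND PROOFS =====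

-- the visited array A's loop carries after processing prefix p of the key
def mkVis (s p : List String) : List Bool :=
  (List.range s.length).map (fun i => decide ((s.take i).count (s.getD i "") < p.count (s.getD i "")))

-- A's rank strings for the suffix t, after prefix p has been processed
def ranksAux (s : List String) : List String → List String → List String
  | _, [] => []
  | p, c :: t =>
      PySem.Int.toStr (((s.countP (fun d => decide (d < c)) + p.count c : Nat) : Int) + 1)
        :: ranksAux s (p ++ [c]) t

theorem pos_formula (s : List String) (hs : s.Pairwise (· ≤ ·)) (i : Nat) (hi : i < s.length) :
    i = s.countP (fun d => decide (d < s[i])) + (s.take i).count s[i] := by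
  set c := s[i] with hc
  have hpg := List.pairwise_iff_getElem.mp hs
  have hdrop : (s.drop i).countP (fun d => decide (d < c)) = 0 := by
    rw [List.countP_eq_zero]
    intro a ha
    obtain ⟨k, hk, rfl⟩ := List.mem_iff_getElem.mp ha
    have hk' : i + k < s.length := by simp only [List.length_drop] at hk; omega
    rw [List.getElem_drop]
    simp only [decide_eq_true_eq, not_lt]
    rcases Nat.eq_zero_or_pos k with h | h
    · subst h; exact le_of_eq (by simp [hc])
    · have := hpg i (i + k) hi hk' (by omega)
      rw [hc]; exact this
  have hsplit : s.countP (fun d => decide (d < c))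
      = (s.take i).countP (fun d => decide (d < c)) := by
    conv_lhs => rw [← List.take_append_drop i s]
    rw [List.countP_append, hdrop]; omega
  have hlen : (s.take i).length = i := by simp; omega
  have hnot : (s.take i).countP (fun d => decide ¬(decide (d < c) = true)) = (s.take i).count c := by
    rw [List.count_eq_countP]
    apply List.countP_congr
    intro a ha
    have hle : a ≤ c := by
      obtain ⟨k, hk, rfl⟩ := List.mem_iff_getElem.mp ha
      have hki : k < i := by omega
      rw [List.getElem_take, hc]
      exact hpg k i (by omega) hi hki
    by_cases h : a = c
    · simp [h]
    · have hlt : a < c := lt_of_le_of_ne hle h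
      simp [h, hlt]
  have hcp := List.length_eq_countP_add_countP (fun d => decide (d < c)) (l := s.take i)
  rw [hlen, hnot] at hcp
  omega

theorem occ_exists (s : List String) (c : String) : ∀ (k : Nat), k < s.count c →
    ∃ i, ∃ h : i < s.length, s[i] = c ∧ (s.take i).count c = k := by
  induction s with
  | nil => intro k hk; simp at hk
  | cons d t ih =>
    intro k hk
    by_cases hd : d = c
    · subst hd
      match k with
      | 0 => exact ⟨0, by simp, by simp, by simp⟩
      | k + 1 =>
        rw [List.count_cons_self] at hk
        obtain ⟨i, h, hc, hcnt⟩ := ih k (by omega)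
        exact ⟨i + 1, by simpa using h, by simpa using hc, by simpa using hcnt⟩
    · rw [List.count_cons_of_ne (by simpa using hd)] at hk
      obtain ⟨i, h, hc, hcnt⟩ := ih k hk
      exact ⟨i + 1, by simpa using h, by simpa using hc, by simp [hd, hcnt]⟩

theorem findIndexGo_hit (s : List String) (v : List Bool) (c : String) (t : Nat)
    (ht : t < s.length) (hc : s[t] = c) (hv : v.getD t false = false)
    (hmiss : ∀ j, j < t → ¬(s.getD j "" = c ∧ v.getD j false = false)) :
    ∀ n i, i + n = t → findIndexGo s v c i = (some t, v.set t true) := by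
  intro n
  induction n with
  | zero =>
    intro i hi
    have hi' : i = t := by omega
    subst hi'
    rw [findIndexGo]
    rw [dif_pos ht, if_pos ⟨hc, hv⟩]
  | succ n ih =>
    intro i hi
    have hlt : i < s.length := by omega
    rw [findIndexGo, dif_pos hlt, if_neg, ih (i + 1) (by omega)]
    have := hmiss i (by omega)
    rwa [List.getD_eq_getElem _ _ hlt] at this

theorem mkVis_getD (s p : List String) (j : Nat) (hj : j < s.length) :
    (mkVis s p).getD j false = decide ((s.take j).count s[j] < p.count s[j]) := by
  rw [mkVis, List.getD_eq_getElem _ _ (by simpa using hj)]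
  simp [List.getD_eq_getElem?_getD, List.getElem?_eq_getElem hj]

theorem find_index_eq (s p : List String) (c : String) (hs : s.Pairwise (· ≤ ·))
    (hcnt : p.count c < s.count c) :
    find_index s (mkVis s p) c
      = (some (s.countP (fun d => decide (d < c)) + p.count c), mkVis s (p ++ [c])) := by
  set k := p.count c with hk
  obtain ⟨t, ht, htc, htk⟩ := occ_exists s c k hcnt
  have hteq : t = s.countP (fun d => decide (d < c)) + k := by
    have hpf := pos_formula s hs t ht
    rw [htc] at hpf
    omega
  have hmiss : ∀ j, j < t → ¬(s.getD j "" = c ∧ (mkVis s p).getD j false = false) := by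
    intro j hj hcon
    have hjlen : j < s.length := by omega
    rw [List.getD_eq_getElem _ _ hjlen] at hcon
    obtain ⟨hjc, hjv⟩ := hcon
    rw [mkVis_getD s p j hjlen, hjc] at hjv
    have hpf := pos_formula s hs j hjlen
    rw [hjc] at hpf
    simp only [decide_eq_false_iff_not, not_lt] at hjv
    omega
  have hvt : (mkVis s p).getD t false = false := by
    rw [mkVis_getD s p t ht, htc, htk]
    simp
    omega
  have hrun := findIndexGo_hit s (mkVis s p) c t ht htc hvt hmiss t 0 (by omega)
  rw [find_index, hrun, hteq]
  congr 1
  -- (mkVis s p).set t true = mkVis s (p ++ [c])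
  apply List.ext_getElem
  · simp [mkVis]
  · intro j hj1 hj2
    have hjlen : j < s.length := by simpa [mkVis] using hj2
    have hmk : ∀ q : List String, (mkVis s q)[j]'(by simpa [mkVis] using hjlen)
        = decide ((s.take j).count s[j] < q.count s[j]) := by
      intro q
      simp [mkVis, List.getD_eq_getElem?_getD, List.getElem?_eq_getElem hjlen]
    by_cases hjt : j = t
    · subst hjt
      simp only [← hteq]
      rw [List.getElem_set_self, hmk, htc]
      have hpc : List.count c (p ++ [c]) = k + 1 := by
        simp [List.count_append]; omega
      rw [hpc, htk]
      simp
    · rw [List.getElem_set_ne (by omega), hmk, hmk]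
      by_cases hjc : s[j] = c
      · have hpf := pos_formula s hs j hjlen
        rw [hjc] at hpf
        have hne : (s.take j).count c ≠ k := by omega
        have hpc : List.count c (p ++ [c]) = k + 1 := by
          simp [List.count_append]; omega
        rw [hjc, hpc]
        simp only [decide_eq_decide]
        omega
      · have h1 : List.count s[j] [c] = 0 := List.count_eq_zero.mpr (by simp [hjc])
        have h0 : List.count s[j] (p ++ [c]) = List.count s[j] p := by
          rw [List.count_append, h1]; omega
        rw [h0]

theorem foldA (l s : List String) (hs : s.Pairwise (· ≤ ·)) (hperm : s.Perm l) :
    ∀ t p pre, l = p ++ t → pre.length = p.length →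
    (t.foldl (fun (st : List String × List Bool × Nat) c =>
        let r := find_index s st.2.1 c
        let rankStr := match r.1 with
          | some i => PySem.Int.toStr ((i : Int) + 1)
          | none => ""
        (st.1.set st.2.2 rankStr, r.2, st.2.2 + 1))
      (pre ++ List.replicate t.length "", mkVis s p, p.length)).1
    = pre ++ ranksAux s p t := by
  intro t
  induction t with
  | nil => intro p pre hl hlen; simp [ranksAux]
  | cons c t ih =>
    intro p pre hl hlen
    have hcnt : p.count c < s.count c := by
      have h1 : s.count c = l.count c := hperm.count_eq c
      rw [hl, List.count_append, List.count_cons_self] at h1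
      omega
    rw [List.foldl_cons]
    simp only [find_index_eq s p c hs hcnt]
    set x := PySem.Int.toStr (((s.countP (fun d => decide (d < c)) + p.count c : Nat) : Int) + 1) with hx
    have hset : (pre ++ List.replicate (c :: t).length "").set p.length x
        = (pre ++ [x]) ++ List.replicate t.length "" := by
      rw [List.set_append, if_neg (by omega)]
      have h0 : p.length - pre.length = 0 := by omega
      simp [h0, List.replicate_succ]
    simp only [hset]
    have h2 := ih (p ++ [c]) (pre ++ [x]) (by rw [hl]; simp) (by simp [hlen])
    simp only [List.length_append, List.length_cons, List.length_nil] at h2 ⊢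
    have hidx : p.length + (0 + 1) = p.length + 1 := by omega
    rw [hidx, h2]
    simp [ranksAux, hx]

theorem ranksB (l s : List String) (hs : s.Perm l) :
    ∀ t p, l = p ++ t →
    (PySem.List.enumerate t (p.length : Int)).map (fun q =>
      PySem.Int.toStr (1 + (l.map (fun d => if d < q.2 then (1 : Int) else 0)).sum
        + ((PySem.List.slice l none (some q.1)).map (fun d => if d = q.2 then (1 : Int) else 0)).sum))
    = ranksAux s p t := by
  intro t
  induction t with
  | nil => intro p hl; simp [ranksAux, PySem.List.enumerate]
  | cons c t ih =>
    intro p hl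
    rw [PySem.List.enumerate_cons, List.map_cons]
    congr 1
    · -- head
      rw [PySem.List.slice_to l (by positivity)]
      have htake : List.take ((p.length : Int)).toNat l = p := by
        rw [hl]; simp
      rw [htake]
      have h1 : (l.map (fun d => if d < c then (1 : Int) else 0)).sum
          = (l.countP (fun d => decide (d < c)) : Int) := by
        simpa using PySem.List.sum_map_ite_one_zero (fun d => decide (d < c)) l
      have h2 : (p.map (fun d => if d = c then (1 : Int) else 0)).sum
          = (p.countP (fun d => decide (d = c)) : Int) := by
        simpa using PySem.List.sum_map_ite_one_zero (fun d => decide (d = c)) p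
      rw [h1, h2]
      have h3 : p.countP (fun d => decide (d = c)) = p.count c := by
        rw [List.count_eq_countP]
        apply List.countP_congr
        intro a _
        simp
      have h4 : l.countP (fun d => decide (d < c)) = s.countP (fun d => decide (d < c)) :=
        (hs.countP_eq _).symm
      rw [h3, h4]
      show _ = PySem.Int.toStr (((s.countP (fun d => decide (d < c)) + p.count c : Nat) : Int) + 1)
      congr 1
      push_cast
      ring
    · -- tail
      have h5 := ih (p ++ [c]) (by rw [hl]; simp)
      have h6 : (((p ++ [c]).length : Nat) : Int) = (p.length : Int) + 1 := by
        simp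
      rw [h6] at h5
      exact h5

theorem mkVis_nil (s : List String) : mkVis s [] = List.replicate s.length false := by
  simp [mkVis]

-- ===== VERDICT (by name: the statement is the Claim_ definition above) =====
theorem gen_key_arr_spec : Claim_equal_gen_key_arr := by
  intro key _
  show gen_key_arr key = gen_key_arr_alt key
  unfold gen_key_arr gen_key_arr_alt
  dsimp only
  set l := key.toList.map (fun c => String.mk [c]) with hl
  set s := PySem.List.sorted l (fun x => x) false with hsd
  have hs : s.Pairwise (· ≤ ·) := PySem.List.sorted_pairwise l (fun x => x)
  have hperm : s.Perm l := PySem.List.sorted_perm l (fun x => x) false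
  have hA := foldA l s hs hperm l [] [] rfl rfl
  simp only [List.nil_append, List.length_nil, mkVis_nil, hperm.length_eq] at hA
  have hB := ranksB l s hperm l [] rfl
  simp only [List.length_nil, Nat.cast_zero] at hB
  rw [hA, hB]
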